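-- pv_equiv track=rewrite | github.com/brianchiang-tw/Python | library/image_tool_box.py | extend_image_array_with_padding
-- ===== SOURCE A (Python) =====
-- def create_image_matrx( height = 2 , width = 2, default_pixel_value = 0 ):
--
--     image_matrix = [ [ default_pixel_value for x in range(width) ] for y in range(height)  ]
--     return image_matrix
--
-- def extend_image_array_with_padding( image_matrix, padding_size = 0, padding_item = 0x00 ):
--
--     image_height = len( image_matrix )
--     image_width = len( image_matrix[0] )
--
--     new_height = image_height + int( padding_size * 2 )
--     new_width = image_width + int( padding_size * 2 )
--
--     extended_image = create_image_matrx( new_height, new_width, 0x00 )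
--
--     for y in range( new_height):
--         for x in range( new_width ):
--
--             if padding_size <= y < ( padding_size + image_height ) and padding_size <= x < ( padding_size + image_width ):
--                 # Copy original image in main center area
--                 extended_image[ y ][ x ] = image_matrix[ y-padding_size ][ x-padding_size ]
--
--             else:
--                 # Padding boundary with specified dummy item
--                 extended_image[ y ][ x ] = padding_item
--
--
--     return extended_image
-- ===== SOURCE B (Python) =====
-- def extend_image_array_with_padding(image_matrix, padding_size=0, padding_item=0x00):
--     new_width = len(image_matrix[0]) + int(padding_size * 2)
--     pad_row = [padding_item] * new_width
--     side = [padding_item] * padding_size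
--     top = [list(pad_row) for _ in range(padding_size)]
--     bottom = [list(pad_row) for _ in range(padding_size)]
--     return top + [side + row + side for row in image_matrix] + bottom
-- ===== Notes on version B (the rewrite author's own statement) =====
-- stated objective: simpler
-- what changed: Replaces the per-cell double loop with a conditional on each cell by row-level construction: list multiplication builds the padding rows and each centre row is side + original_row + side, assembled by concatenation.
-- intended difference: On padding_size < 0 A silently crops the image by |padding_size| on each side (an accident of its index arithmetic), while B adds no padding and returns the image unchanged, the intended no-op for a non-positive padding request. — e.g. on extend_image_array_with_padding([[1, 2], [3, 4]], -1, 9): A returns [], B returns [[1, 2], [3, 4]]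
-- outside the precondition, e.g. on extend_image_array_with_padding([[1, 2], [3, 4, 5]], 0, 9): A returns [[1, 2], [3, 4]], B returns [[1, 2], [3, 4, 5]]
import Mathlib
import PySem

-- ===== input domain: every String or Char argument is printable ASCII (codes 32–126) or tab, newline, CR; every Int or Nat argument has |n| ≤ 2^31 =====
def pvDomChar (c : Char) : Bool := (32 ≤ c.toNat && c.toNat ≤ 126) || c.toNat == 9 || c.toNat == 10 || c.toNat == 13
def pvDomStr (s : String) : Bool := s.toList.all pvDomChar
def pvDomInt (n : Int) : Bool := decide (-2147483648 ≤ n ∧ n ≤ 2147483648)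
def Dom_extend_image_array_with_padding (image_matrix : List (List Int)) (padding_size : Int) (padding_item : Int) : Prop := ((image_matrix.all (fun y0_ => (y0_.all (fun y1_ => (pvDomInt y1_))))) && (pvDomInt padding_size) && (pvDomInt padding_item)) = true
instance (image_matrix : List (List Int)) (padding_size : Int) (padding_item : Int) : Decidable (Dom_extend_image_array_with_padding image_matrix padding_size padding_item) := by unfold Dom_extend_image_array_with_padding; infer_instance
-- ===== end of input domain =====

-- B builds the padded image by row-level list construction (replicated padding rows and
-- side ++ row ++ side centre rows) instead of A's per-cell double loop with a conditional.
-- Equivalence is about the RETURN value; neither program mutates its arguments.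

-- ===== PORT A =====
-- port of create_image_matrx (same module helper A calls)
def pvCreateImageMatrix (height : Int) (width : Int) (default_pixel_value : Int) : List (List Int) :=
  (PySem.List.pyRange 0 height 1).map (fun _ => (PySem.List.pyRange 0 width 1).map (fun _ => default_pixel_value))

-- literal port of A: `int(padding_size*2)` is `padding_size*2` on Int; `image_matrix[0]` and
-- `image_matrix[y-p][x-p]` are ported with pyGetD (Pre_ keeps every index in range, so the
-- defaults are never consulted); the cell assignment `extended_image[y][x] = v` is `set` at
-- the (in-range, nonnegative) loop indices.
def extend_image_array_with_padding (image_matrix : List (List Int)) (padding_size : Int) (padding_item : Int) : List (List Int) :=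
  let image_height : Int := image_matrix.length
  let image_width : Int := (PySem.List.pyGetD image_matrix 0 []).length
  let new_height := image_height + padding_size * 2
  let new_width := image_width + padding_size * 2
  let extended_image := pvCreateImageMatrix new_height new_width 0
  (PySem.List.pyRange 0 new_height 1).foldl (fun ext y =>
    (PySem.List.pyRange 0 new_width 1).foldl (fun ext x =>
      let v := if padding_size ≤ y ∧ y < padding_size + image_height ∧
                  padding_size ≤ x ∧ x < padding_size + image_width then
        PySem.List.pyGetD (PySem.List.pyGetD image_matrix (y - padding_size) []) (x - padding_size) 0
      else
        padding_item
      ext.set y.toNat ((ext.getD y.toNat []).set x.toNat v)) ext) extended_image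

-- ===== PORT B =====
-- literal port of Source B: `[x]*n` is List.replicate n.toNat x (empty for negative n, as in Python)
def extend_image_array_with_padding_alt (image_matrix : List (List Int)) (padding_size : Int) (padding_item : Int) : List (List Int) :=
  let new_width : Int := ((PySem.List.pyGetD image_matrix 0 []).length : Int) + padding_size * 2
  let pad_row := List.replicate new_width.toNat padding_item
  let side := List.replicate padding_size.toNat padding_item
  let top := (PySem.List.pyRange 0 padding_size 1).map (fun _ => pad_row)
  let bottom := (PySem.List.pyRange 0 padding_size 1).map (fun _ => pad_row)
  top ++ image_matrix.map (fun row => side ++ row ++ side) ++ bottom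

-- ===== PRECONDITION & SPEC =====
-- Pre_ excludes: the empty matrix (A raises IndexError on image_matrix[0]) and ragged
-- matrices (A raises IndexError or silently truncates rows to the first row's length
-- depending on the row lengths -- a corner no caller of an image padder would specify).
def Pre_extend_image_array_with_padding (image_matrix : List (List Int)) (padding_size : Int) (padding_item : Int) : Prop :=
  image_matrix ≠ [] ∧ ∀ r ∈ image_matrix, r.length = (image_matrix.headD []).length
instance (image_matrix : List (List Int)) (padding_size : Int) (padding_item : Int) : Decidable (Pre_extend_image_array_with_padding image_matrix padding_size padding_item) := by unfold Pre_extend_image_array_with_padding; infer_instance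

def pvWitness_extend_image_array_with_padding : List (List Int) × Int × Int := ([[1, 2], [3, 4]], 1, 9)

-- On padding_size < 0 A silently CROPS the image by |padding_size| on each side (an accident
-- of its index arithmetic); B adds no padding and returns the image unchanged, the intended
-- no-op for a non-positive padding request.
def D_extend_image_array_with_padding (image_matrix : List (List Int)) (padding_size : Int) (padding_item : Int) : Prop :=
  padding_size < 0
instance (image_matrix : List (List Int)) (padding_size : Int) (padding_item : Int) : Decidable (D_extend_image_array_with_padding image_matrix padding_size padding_item) := by unfold D_extend_image_array_with_padding; infer_instance

def Spec_extend_image_array_with_padding (image_matrix : List (List Int)) (padding_size : Int) (padding_item : Int) (out : List (List Int)) : Prop := ¬ D_extend_image_array_with_padding image_matrix padding_size padding_item → out = extend_image_array_with_padding_alt image_matrix padding_size padding_item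
instance (image_matrix : List (List Int)) (padding_size : Int) (padding_item : Int) (out : List (List Int)) : Decidable (Spec_extend_image_array_with_padding image_matrix padding_size padding_item out) := by unfold Spec_extend_image_array_with_padding; infer_instance

def pvDiffWitness_extend_image_array_with_padding : List (List Int) × Int × Int := ([[1, 2], [3, 4]], -1, 9)
def pvDiffWitnessOut_extend_image_array_with_padding : (List (List Int)) × (List (List Int)) := ([], [[1, 2], [3, 4]])

-- ===== CLAIM (what is proved, stated in full; the proofs are below) =====
def Claim_unchanged_extend_image_array_with_padding : Prop := ∀ (image_matrix : List (List Int)) (padding_size : Int) (padding_item : Int), Dom_extend_image_array_with_padding image_matrix padding_size padding_item → Pre_extend_image_array_with_padding image_matrix padding_size padding_item → Spec_extend_image_array_with_padding image_matrix padding_size padding_item (extend_image_array_with_padding image_matrix padding_size padding_item)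
def Claim_changed_extend_image_array_with_padding : Prop := Dom_extend_image_array_with_padding (pvDiffWitness_extend_image_array_with_padding.1) (pvDiffWitness_extend_image_array_with_padding.2.1) (pvDiffWitness_extend_image_array_with_padding.2.2) ∧ Pre_extend_image_array_with_padding (pvDiffWitness_extend_image_array_with_padding.1) (pvDiffWitness_extend_image_array_with_padding.2.1) (pvDiffWitness_extend_image_array_with_padding.2.2) ∧ D_extend_image_array_with_padding (pvDiffWitness_extend_image_array_with_padding.1) (pvDiffWitness_extend_image_array_with_padding.2.1) (pvDiffWitness_extend_image_array_with_padding.2.2) ∧ extend_image_array_with_padding (pvDiffWitness_extend_image_array_with_padding.1) (pvDiffWitness_extend_image_array_with_padding.2.1) (pvDiffWitness_extend_image_array_with_padding.2.2) = pvDiffWitnessOut_extend_image_array_with_padding.1 ∧ extend_image_array_with_padding_alt (pvDiffWitness_extend_image_array_with_padding.1) (pvDiffWitness_extend_image_array_with_padding.2.1) (pvDiffWitness_extend_image_array_with_padding.2.2) = pvDiffWitnessOut_extend_image_array_with_padding.2 ∧ pvDiffWitnessOut_extend_image_array_with_padding.1 ≠ pvDiffWitnessOut_extend_image_array_with_pa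dding.2
def Claim_exact_extend_image_array_with_padding : Prop := ∀ (image_matrix : List (List Int)) (padding_size : Int) (padding_item : Int), Dom_extend_image_array_with_padding image_matrix padding_size padding_item → Pre_extend_image_array_with_padding image_matrix padding_size padding_item → D_extend_image_array_with_padding image_matrix padding_size padding_item → extend_image_array_with_padding image_matrix padding_size padding_item ≠ extend_image_array_with_padding_alt image_matrix padding_size padding_item

-- ===== LEMMAS AND PROOFS =====

theorem pvRowSet (N : Nat) (g : Nat → Int) :
    ∀ r : List Int, N ≤ r.length →
      (List.range N).foldl (fun r i => r.set i (g i)) r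
        = (List.ofFn fun i : Fin N => g i) ++ r.drop N := by
  induction N with
  | zero => intro r _; simp
  | succ n ih =>
    intro r hr
    rw [List.range_succ, List.foldl_append, ih r (by omega)]
    simp only [List.foldl_cons, List.foldl_nil]
    rw [List.set_append_right _ _ (by simp)]
    rw [List.ofFn_succ_last, List.append_assoc]
    simp only [List.length_ofFn, Nat.sub_self, List.singleton_append, Fin.val_castSucc, Fin.val_last]
    rw [List.drop_eq_getElem_cons (show n < r.length by omega), List.set_cons_zero]

theorem pvInnerComm (L : List Nat) (yn : Nat) (g : Nat → Int) :
    ∀ e : List (List Int), yn < e.length →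
      L.foldl (fun e x => e.set yn ((e.getD yn []).set x (g x))) e
        = e.set yn (L.foldl (fun r x => r.set x (g x)) (e.getD yn [])) := by
  induction L with
  | nil =>
    intro e he
    simp only [List.foldl_nil, List.getD, List.getElem?_eq_getElem he, Option.getD_some]
    exact (List.set_getElem_self he).symm
  | cons x L ih =>
    intro e he
    simp only [List.foldl_cons]
    rw [ih _ (by simpa using he)]
    have hget : (e.set yn ((e.getD yn []).set x (g x))).getD yn []
        = (e.getD yn []).set x (g x) := by
      simp [List.getD, List.getElem?_set_self', List.getElem?_eq_getElem he]
    rw [hget, List.set_set]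

theorem pvMatSet (nw : Nat) (f : Nat → Nat → Int) (H : Nat) :
    ∀ e : List (List Int), H ≤ e.length → (∀ r ∈ e, r.length = nw) →
      (List.range H).foldl (fun ext yn =>
          (List.range nw).foldl (fun ext xn =>
            ext.set yn ((ext.getD yn []).set xn (f yn xn))) ext) e
        = (List.ofFn fun y : Fin H => List.ofFn fun x : Fin nw => f y x) ++ e.drop H := by
  induction H with
  | zero => intro e _ _; simp
  | succ n ih =>
    intro e he hrows
    rw [List.range_succ, List.foldl_append, ih e (by omega) hrows]
    simp only [List.foldl_cons, List.foldl_nil]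
    rw [pvInnerComm _ n _ _ (by simp; omega)]
    have hget : ((List.ofFn fun y : Fin n => List.ofFn fun x : Fin nw => f y x) ++ e.drop n).getD n [] = e[n]'(by omega) := by
      rw [List.getD_eq_getElem _ _ (by simp; omega)]
      rw [List.getElem_append_right (by simp)]
      simp
    have hrlen : e[n]'(by omega) ∈ e := List.getElem_mem _
    rw [hget, pvRowSet nw _ _ (le_of_eq (hrows _ hrlen).symm),
        List.drop_of_length_le (le_of_eq (hrows _ hrlen)), List.append_nil,
        List.set_append_right _ _ (by simp)]
    rw [List.ofFn_succ_last, List.append_assoc]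
    simp only [List.length_ofFn, Nat.sub_self, List.singleton_append, Fin.val_castSucc, Fin.val_last]
    rw [List.drop_eq_getElem_cons (show n < e.length by omega), List.set_cons_zero]

theorem pvLenFold {β : Type} (L : List β) (g : List (List Int) → β → List (List Int))
    (hg : ∀ e y, (g e y).length = e.length) : ∀ e, (L.foldl g e).length = e.length := by
  induction L with
  | nil => intro e; rfl
  | cons y L ih => intro e; rw [List.foldl_cons, ih, hg]

-- ===== VERDICT (by name: the statement is the Claim_ definition above) =====
theorem extend_image_array_with_padding_spec : Claim_unchanged_extend_image_array_with_padding := by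
  intro m ps pi_ _ hpre
  obtain ⟨hne, hrect⟩ := hpre
  unfold Spec_extend_image_array_with_padding
  intro hD
  have hp : 0 ≤ ps := by unfold D_extend_image_array_with_padding at hD; omega
  obtain ⟨pn, rfl⟩ : ∃ pn : Nat, ps = (pn : Int) := ⟨ps.toNat, (Int.toNat_of_nonneg hp).symm⟩
  have hw : (m.headD []).length = (PySem.List.pyGetD m 0 []).length := by
    cases m with
    | nil => exact absurd rfl hne
    | cons a t => simp [PySem.List.pyGetD, PySem.List.pyGet?, PySem.List.pyIdx?]
  set wn := (PySem.List.pyGetD m 0 []).length with hwn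
  set hn := m.length with hhn
  simp only [extend_image_array_with_padding, extend_image_array_with_padding_alt, pvCreateImageMatrix]
  have hch : ((hn : Int) + (pn : Int) * 2) = ((hn + 2 * pn : Nat) : Int) := by push_cast; ring
  have hcw : ((wn : Int) + (pn : Int) * 2) = ((wn + 2 * pn : Nat) : Int) := by push_cast; ring
  rw [hch, hcw, PySem.List.pyRange_zero_natCast (hn + 2*pn), PySem.List.pyRange_zero_natCast (wn + 2*pn),
      PySem.List.pyRange_zero_natCast pn]
  simp only [List.foldl_map, Int.toNat_natCast]
  rw [pvMatSet (wn + 2*pn) _ (hn + 2*pn) _ (by simp) (by intro r hr; simp at hr; obtain ⟨_,_,rfl⟩ := hr; simp)]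
  rw [List.drop_of_length_le (by simp), List.append_nil]
  have hmc : ∀ (c : List Int), List.map (fun _ => c) (List.map (fun k : Nat => (k:Int)) (List.range pn)) = List.replicate pn c := by
    intro c; rw [List.map_const']; simp
  rw [hmc]
  apply List.ext_getElem (by simp; omega)
  intro i h1 h2
  simp only [List.getElem_ofFn]
  by_cases hc1 : i < pn
  · rw [List.getElem_append_left (by simp; omega), List.getElem_append_left (by simpa using hc1),
        List.getElem_replicate]
    apply List.ext_getElem (by simp)
    intro x hx1 hx2
    simp only [List.getElem_ofFn, List.getElem_replicate]
    rw [if_neg (by push_cast; omega)]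
  · by_cases hc2 : i < pn + hn
    · rw [List.getElem_append_left (by simp; omega),
          List.getElem_append_right (by simp; omega), List.getElem_map]
      have hrowlen : ∀ j (hj : j < m.length), (m[j]'hj).length = wn := by
        intro j hj; rw [hrect _ (List.getElem_mem _), hw]
      apply List.ext_getElem (by simp [hrowlen]; omega)
      intro x hx1 hx2
      simp only [List.getElem_ofFn]
      by_cases hxa : x < pn
      · rw [if_neg (by push_cast; omega), List.getElem_append_left (by simp; omega),
            List.getElem_append_left (by simpa using hxa), List.getElem_replicate]
      · by_cases hxb : x < pn + wn
        · rw [if_pos (by push_cast; omega)]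
          have e1 : ((x:Int) - (pn:Int)) = ((x - pn : Nat) : Int) := by omega
          have e2 : ((i:Int) - (pn:Int)) = ((i - pn : Nat) : Int) := by omega
          rw [e1, e2, PySem.List.pyGetD_natCast, PySem.List.pyGetD_natCast]
          rw [List.getElem_append_left (by simp [hrowlen]; omega),
              List.getElem_append_right (by simp; omega)]
          simp only [List.length_replicate]
          rw [List.getD_eq_getElem _ _ (show i - pn < m.length by omega),
              List.getD_eq_getElem _ _ (by rw [hrowlen _ (by omega)]; omega)]
        · rw [if_neg (by push_cast; omega),
              List.getElem_append_right (by simp [hrowlen]; omega), List.getElem_replicate]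
    · rw [List.getElem_append_right (by simp; omega), List.getElem_replicate]
      apply List.ext_getElem (by simp)
      intro x hx1 hx2
      simp only [List.getElem_ofFn, List.getElem_replicate]
      rw [if_neg (by push_cast; omega)]

theorem extend_image_array_with_padding_changed : Claim_changed_extend_image_array_with_padding := by
  unfold Claim_changed_extend_image_array_with_padding; decide

theorem extend_image_array_with_padding_tight : Claim_exact_extend_image_array_with_padding := by
  intro m ps pi_ _ hpre hD heq
  obtain ⟨hne, hrect⟩ := hpre
  unfold D_extend_image_array_with_padding at hD
  have hA : (extend_image_array_with_padding m ps pi_).length = ((m.length : Int) + ps * 2).toNat := by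
    simp only [extend_image_array_with_padding, pvCreateImageMatrix]
    rw [pvLenFold _ _ (fun e y => pvLenFold _ _ (fun e' x => List.length_set ..) e)]
    simp
  have hB : (extend_image_array_with_padding_alt m ps pi_).length = ps.toNat + m.length + ps.toNat := by
    simp only [extend_image_array_with_padding_alt]
    simp; omega
  have hm : m.length ≠ 0 := fun h => hne (List.eq_nil_of_length_eq_zero h)
  have := congrArg List.length heq
  rw [hA, hB] at this
  omega
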